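-- pv_equiv track=rewrite | github.com/fearlesspandas/tda | tda2.py | complexify
-- ===== SOURCE A (Python) =====
-- def complexify(s,p = 0): #generates the complex of simplex s when p is left as 0. Otherwise a subcomplex of faces with vertices < p never removed, is generated
--     if len(s)==1:
--         return [s]
--     else:
--         l=[]
--         for i in range(p,len(s)):
--             n=len(s)-i-1
--             ss=s.copy()
--             ss.remove(s[n])
--             l.append(ss)
--             l=l+complexify(ss,i)
--         return l + [s]
-- ===== SOURCE B (Python) =====
-- def _down(s, n):
--     # Faces of s obtained by deleting removal positions n, n-1, ..., 0 (each deletion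
--     # removes the FIRST occurrence of the value at that position), each face followed
--     # by its own subfaces, and finally s itself.
--     if n < 0:
--         return [s]
--     j = s.index(s[n])
--     ss = s[:j] + s[j + 1:]
--     sub = [ss] if len(ss) == 1 else _down(ss, n - 1)
--     return [ss] + sub + _down(s, n - 1)
--
-- def complexify(s, p=0):
--     if len(s) == 1:
--         return [s]
--     return _down(s, len(s) - p - 1)
-- ===== Notes on version B (the rewrite author's own statement) =====
-- stated objective: alternative
-- what changed: B replaces A's for-loop over i=range(p,len(s)) with copy/remove and recursive list concatenation by a direct recursion on removal position n=len(s)-i-1 counting down to 0, using the identity that the subcall's start parameter becomes the same countdown n-1 on the face (no range loop at all); removal is done by slicing around the first index of the removed value.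
import Mathlib
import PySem

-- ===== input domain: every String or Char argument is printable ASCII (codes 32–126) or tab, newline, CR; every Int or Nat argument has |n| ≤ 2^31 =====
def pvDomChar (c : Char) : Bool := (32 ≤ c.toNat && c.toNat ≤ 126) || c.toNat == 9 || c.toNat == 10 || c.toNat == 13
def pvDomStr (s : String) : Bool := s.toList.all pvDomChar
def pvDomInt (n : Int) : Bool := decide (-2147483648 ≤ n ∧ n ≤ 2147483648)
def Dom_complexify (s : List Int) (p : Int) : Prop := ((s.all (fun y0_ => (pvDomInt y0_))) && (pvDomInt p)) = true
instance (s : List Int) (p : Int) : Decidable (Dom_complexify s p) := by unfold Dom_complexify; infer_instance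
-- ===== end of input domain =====

-- B replaces A's for-loop over i = range(p, len(s)) with copy/remove and recursive
-- concatenation by a single direct recursion that counts the removal position
-- n = len(s)-i-1 DOWN to 0, using that the subcall's start parameter translates to the
-- same countdown position n-1 on the face (alternative decomposition; same values, same order).

-- ===== PORT A =====
-- fuel = recursion guard only (each recursive call shortens s by one); s.length + 1 always suffices
def complexifyA : Nat → List Int → Int → List (List Int)
  | 0, _, _ => []
  | fuel+1, s, p =>
    if s.length = 1 then [s]
    else
      (PySem.List.pyRange p (s.length : Int) 1).foldl (fun l i =>
        -- n = len(s)-i-1; ss = s.copy(); ss.remove(s[n]); l.append(ss); l = l + complexify(ss, i)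
        l ++ (match PySem.List.pyGet? s ((s.length : Int) - i - 1) with
              | none => []    -- Python A raises IndexError here (excluded by Pre_)
              | some v =>
                match PySem.List.remove? s v with
                | none => []  -- unreachable (v ∈ s)
                | some ss => [ss] ++ complexifyA fuel ss i)) []
      ++ [s]

def complexify (s : List Int) (p : Int) : List (List Int) := complexifyA (s.length + 1) s p

-- ===== PORT B =====
-- j = s.index(s[n]); ss = s[:j] + s[j+1:]  (none = the IndexError Python B raises when n ≥ len(s))
def faceAt (s : List Int) (n : Int) : Option (List Int) :=
  (PySem.List.pyGet? s n).bind fun v =>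
    (PySem.List.index? s v).map fun (j : Nat) =>
      PySem.List.slice s none (some (j : Int)) ++ PySem.List.slice s (some ((j : Int) + 1)) none

-- the two slices around the first index of the removed value, as take/drop
lemma slice_pair_eq (s : List Int) (j : Nat) :
    PySem.List.slice s none (some (j : Int)) ++
      PySem.List.slice s (some ((j : Int) + 1)) none = s.take j ++ s.drop (j + 1) := by
  rw [PySem.List.slice_to_natCast,
      show ((j : Int) + 1) = (((j + 1 : Nat)) : Int) by push_cast; ring,
      PySem.List.slice_from_natCast]

-- termination fact for the port: a face is strictly shorter than its simplex
lemma pvFaceLenLt {s : List Int} {n : Int} {ss : List Int} (h : faceAt s n = some ss) :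
    ss.length < s.length := by
  unfold faceAt at h
  cases hg : PySem.List.pyGet? s n with
  | none => rw [hg] at h; cases h
  | some v =>
    rw [hg, Option.bind_some] at h
    cases hj : PySem.List.index? s v with
    | none => rw [hj] at h; cases h
    | some j =>
      rw [hj, Option.map_some] at h
      cases h
      rcases (PySem.List.index?_eq_some_iff _ _ _).mp hj with ⟨pre, suf, hs, hlen, -⟩
      have hl := congrArg List.length hs
      simp at hl
      rw [slice_pair_eq]
      simp
      omega

-- _down(s, n): faces got by deleting removal positions n, n-1, …, 0 (first occurrence of the
-- value at that position), each followed by its own subfaces, and finally s itself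
def complexifyDown (s : List Int) (n : Int) : List (List Int) :=
  if n < 0 then [s]
  else
    match h : faceAt s n with
    | none => []     -- Python B raises IndexError here (excluded by Pre_)
    | some ss =>
      [ss] ++ (if ss.length = 1 then [ss] else complexifyDown ss (n - 1)) ++
        complexifyDown s (n - 1)
termination_by (s.length, (n + 1).toNat)
decreasing_by
  · exact Prod.Lex.left _ _ (pvFaceLenLt h)
  · exact Prod.Lex.right _ (by omega)

def complexify_alt (s : List Int) (p : Int) : List (List Int) :=
  if s.length = 1 then [s] else complexifyDown s ((s.length : Int) - p - 1)

-- ===== PRECONDITION & SPEC =====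
-- Pre_ excludes exactly the inputs where Python A raises IndexError: p < 0 with len(s) ≠ 1
-- (the negative loop indices make n = len(s)-i-1 fall past the end of s).
def Pre_complexify (s : List Int) (p : Int) : Prop := s.length = 1 ∨ 0 ≤ p
instance (s : List Int) (p : Int) : Decidable (Pre_complexify s p) := by unfold Pre_complexify; infer_instance
def pvWitness_complexify : List Int × Int := ([1, 2, 3], 0)

def Spec_complexify (s : List Int) (p : Int) (out : List (List Int)) : Prop := out = complexify_alt s p
instance (s : List Int) (p : Int) (out : List (List Int)) : Decidable (Spec_complexify s p out) := by unfold Spec_complexify; infer_instance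

-- ===== CLAIM (what is proved, stated in full; the proofs are below) =====
def Claim_equal_complexify : Prop := ∀ (s : List Int) (p : Int), Dom_complexify s p → Pre_complexify s p → Spec_complexify s p (complexify s p)

-- ===== LEMMAS AND PROOFS =====

-- one loop iteration of A: the face removed at position len(s)-i-1, then its recursive faces
def hstep (fuel : Nat) (s : List Int) (i : Int) : List (List Int) :=
  match PySem.List.pyGet? s ((s.length : Int) - i - 1) with
  | none => []
  | some v =>
    match PySem.List.remove? s v with
    | none => []
    | some ss => [ss] ++ complexifyA fuel ss i

lemma complexifyA_succ (fuel : Nat) (s : List Int) (p : Int) (h : ¬ s.length = 1) :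
    complexifyA (fuel + 1) s p =
      (PySem.List.pyRange p (s.length : Int) 1).flatMap (hstep fuel s) ++ [s] := by
  rw [complexifyA]
  simp only [h, if_false]
  rw [show (fun l i => l ++ (match PySem.List.pyGet? s ((s.length : Int) - i - 1) with
        | none => []
        | some v =>
          match PySem.List.remove? s v with
          | none => []
          | some ss => [ss] ++ complexifyA fuel ss i)) =
      (fun l i => l ++ hstep fuel s i) from rfl,
      PySem.List.foldl_append_eq_flatMap]
  simp

-- removing the first occurrence of v equals slicing around its first index
lemma remove_eq_index_slices (s : List Int) (v : Int) :
    PySem.List.remove? s v =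
      (PySem.List.index? s v).map (fun j => s.take j ++ s.drop (j + 1)) := by
  unfold PySem.List.remove? PySem.List.index?
  cases h : List.idxOf? v s <;> simp [List.eraseIdx_eq_take_drop_succ]

-- the main correspondence, by induction on a bound for the length of s
lemma main_eq : ∀ (L : Nat) (s : List Int), s.length ≤ L → ∀ p : Int, 0 ≤ p →
    complexifyA (s.length + 1) s p =
      if s.length = 1 then [s] else complexifyDown s ((s.length : Int) - p - 1) := by
  intro L
  induction L with
  | zero =>
    intro s hs p hp
    have hnil : s = [] := List.length_eq_zero_iff.mp (Nat.le_zero.mp hs)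
    subst hnil
    simp only [List.length_nil]
    rw [complexifyA_succ 0 [] p (by simp), if_neg (by simp)]
    rw [complexifyDown, if_pos (by omega : ((0 : Nat) : Int) - p - 1 < 0)]
    rw [PySem.List.pyRange_one_eq_nil (by omega)]
    simp
  | succ L ih =>
    intro s hs p hp
    by_cases h1 : s.length = 1
    · rw [if_pos h1, complexifyA, if_pos h1]
    · rw [if_neg h1, complexifyA_succ _ _ _ h1]
      have down : ∀ (k : Nat) (n : Int), n < (s.length : Int) → (n + 1).toNat ≤ k →
          complexifyDown s n =
            (PySem.List.pyRange ((s.length : Int) - n - 1) (s.length : Int) 1).flatMap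
              (hstep s.length s) ++ [s] := by
        intro k
        induction k with
        | zero =>
          intro n hn hk
          have hn0 : n < 0 := by omega
          rw [complexifyDown, if_pos hn0, PySem.List.pyRange_one_eq_nil (by omega)]
          simp
        | succ k ihk =>
          intro n hn hk
          by_cases hn0 : n < 0
          · rw [complexifyDown, if_pos hn0, PySem.List.pyRange_one_eq_nil (by omega)]
            simp
          · have hnn : 0 ≤ n := by omega
            have hlt : n.toNat < s.length := by omega
            have hv : PySem.List.pyGet? s n = some s[n.toNat] := by
              have h' : PySem.List.pyGet? s ((n.toNat : Nat) : Int) = some s[n.toNat] := by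
                rw [PySem.List.pyGet?_natCast]
                simp [List.getElem?_eq_getElem hlt]
              rw [show ((n.toNat : Nat) : Int) = n from Int.toNat_of_nonneg hnn] at h'
              exact h'
            rw [complexifyDown, if_neg hn0]
            split
            next heq =>
              exfalso
              unfold faceAt at heq
              rw [hv, Option.bind_some] at heq
              cases hj : PySem.List.index? s s[n.toNat] with
              | none =>
                exact (PySem.List.index?_eq_none_iff _ _).mp hj (List.getElem_mem hlt)
              | some j => rw [hj] at heq; cases heq
            next ss heq =>
              -- extract the first index j of the removed value
              unfold faceAt at heq
              rw [hv, Option.bind_some] at heq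
              obtain ⟨j, hj⟩ : ∃ j, PySem.List.index? s s[n.toNat] = some j := by
                cases hj : PySem.List.index? s s[n.toNat] with
                | none => rw [hj] at heq; cases heq
                | some j => exact ⟨j, rfl⟩
              rw [hj, Option.map_some] at heq
              cases heq
              rw [slice_pair_eq]
              have hjlt : j < s.length := by
                rcases (PySem.List.index?_eq_some_iff _ _ _).mp hj with ⟨pre, suf, hs', hlen, -⟩
                have hl := congrArg List.length hs'
                simp at hl
                omega
              have hlen' : (s.take j ++ s.drop (j + 1)).length = s.length - 1 := by
                simp; omega
              -- peel the head of the range on the RHS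
              rw [PySem.List.pyRange_one_cons (by omega), List.flatMap_cons]
              have hstepv : hstep s.length s ((s.length : Int) - n - 1) =
                  (s.take j ++ s.drop (j + 1)) ::
                    complexifyA s.length (s.take j ++ s.drop (j + 1)) ((s.length : Int) - n - 1) := by
                unfold hstep
                rw [show (s.length : Int) - ((s.length : Int) - n - 1) - 1 = n by ring, hv]
                simp [remove_eq_index_slices, -PySem.List.index?_eq_idxOf?, hj]
              rw [hstepv]
              -- the recursive A-call at the face, via the outer induction hypothesis
              have hA : complexifyA s.length (s.take j ++ s.drop (j + 1)) ((s.length : Int) - n - 1) =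
                  if (s.take j ++ s.drop (j + 1)).length = 1 then [s.take j ++ s.drop (j + 1)]
                  else complexifyDown (s.take j ++ s.drop (j + 1)) (n - 1) := by
                have h2 : s.length = (s.take j ++ s.drop (j + 1)).length + 1 := by omega
                rw [h2, ih _ (by omega) _ (by push_cast; omega)]
                by_cases hss1 : (s.take j ++ s.drop (j + 1)).length = 1
                · rw [if_pos hss1, if_pos hss1]
                · rw [if_neg hss1, if_neg hss1,
                    show ((s.take j ++ s.drop (j + 1)).length : Int) -
                      ((((s.take j ++ s.drop (j + 1)).length + 1 : Nat) : Int) - n - 1) - 1 = n - 1 by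
                      push_cast; ring]
              rw [hA, ihk (n - 1) (by omega) (by omega),
                show (s.length : Int) - (n - 1) - 1 = (s.length : Int) - n by ring]
              simp
      rw [down ((s.length : Int) - p).toNat ((s.length : Int) - p - 1) (by omega) (by omega),
        show (s.length : Int) - ((s.length : Int) - p - 1) - 1 = p by ring]

-- ===== VERDICT (by name: the statement is the Claim_ definition above) =====
theorem complexify_spec : Claim_equal_complexify := by
  intro s p _ hpre
  unfold Spec_complexify complexify complexify_alt
  rcases hpre with h1 | hp
  · rw [complexifyA, if_pos h1, if_pos h1]
  · rw [main_eq s.length s le_rfl p hp]
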